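-- pv_equiv track=rewrite | github.com/pyooster/python_codingTest | easyhooon/4월4주차/퍼즐 조각 채우기.py | trans_puzzle
-- ===== SOURCE A (Python) =====
-- def trans_puzzle(puzzle_location):
--     x_min, x_max = 100, -1
--     y_min, y_max = 100, -1
--
--     for (x, y) in puzzle_location:
--         x_min = min(x_min, x)
--         x_max = max(x_max, x)
--         y_min = min(y_min, y)
--         y_max = max(y_max, y)
--
--     x_len = x_max - x_min + 1
--     y_len = y_max - y_min + 1
--
--     trans = [[0] * y_len for _ in range(x_len)]
--
--     for (x, y) in puzzle_location:
--         trans[x - x_min][y - y_min] = 1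
--
--     return trans
-- ===== SOURCE B (Python) =====
-- def trans_puzzle(puzzle_location):
--     xs = [x for x, _ in puzzle_location]
--     ys = [y for _, y in puzzle_location]
--     x_min, y_min = min(xs), min(ys)
--     height = max(xs) - x_min + 1
--     width = max(ys) - y_min + 1
--     rows = {}
--     for x, y in puzzle_location:
--         rows.setdefault(x - x_min, set()).add(y - y_min)
--     return [[1 if j in rows[i] else 0 for j in range(width)] if i in rows else [0] * width
--             for i in range(height)]
-- ===== Notes on version B (the rewrite author's own statement) =====
-- stated objective: alternative
-- what changed: Replaces the mutable preallocate-then-scatter-write grid fill with one grouping pass building a dict from row index to the set of shifted column indices, then emitting the grid purely row by row (an all-zero row, or a membership scan over that row's set); Pre_ excludes the empty list (B's min raises ValueError, A returns []) and lists where on some axis every coordinate exceeds 100 or every coordinate is below -1, where A's 100/-1 min/max seeds pad the grid accidentally.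
-- outside the precondition, e.g. on trans_puzzle([]): A returns [], B raises ValueError; on trans_puzzle([(101, 0)]): A returns [[0], [1]], B returns [[1]]; on trans_puzzle([(0, -2)]): A returns [[1, 0]], B returns [[1]]
import Mathlib
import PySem

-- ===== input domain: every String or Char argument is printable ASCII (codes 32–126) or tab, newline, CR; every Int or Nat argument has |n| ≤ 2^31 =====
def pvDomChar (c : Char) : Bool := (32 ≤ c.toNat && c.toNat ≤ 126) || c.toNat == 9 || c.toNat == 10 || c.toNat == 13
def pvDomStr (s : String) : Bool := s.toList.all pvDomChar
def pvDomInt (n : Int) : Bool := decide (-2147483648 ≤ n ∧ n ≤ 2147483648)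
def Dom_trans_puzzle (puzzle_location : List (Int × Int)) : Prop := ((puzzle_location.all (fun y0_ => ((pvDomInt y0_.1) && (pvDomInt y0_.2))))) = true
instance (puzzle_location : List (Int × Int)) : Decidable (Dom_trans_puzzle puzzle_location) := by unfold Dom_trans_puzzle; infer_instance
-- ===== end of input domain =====

-- B replaces A's in-place scatter-write grid fill by plain min/max bounds, a set of shifted
-- points and a pure full-area membership comprehension (idiomatic; same asymptotic cost).

-- ===== PORT A =====
def trans_puzzle (puzzle_location : List (Int × Int)) : List (List Int) :=
  let r := puzzle_location.foldl
    (fun (s : Int × Int × Int × Int) p =>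
      (min s.1 p.1, max s.2.1 p.1, min s.2.2.1 p.2, max s.2.2.2 p.2))
    (100, -1, 100, -1)
  let x_min := r.1
  let x_max := r.2.1
  let y_min := r.2.2.1
  let y_max := r.2.2.2
  let x_len := x_max - x_min + 1
  let y_len := y_max - y_min + 1
  let trans := (PySem.List.pyRange 0 x_len 1).map (fun _ => PySem.List.pyRepeat [(0 : Int)] y_len)
  puzzle_location.foldl
    (fun t p =>
      PySem.List.pySetD t (p.1 - x_min)
        (PySem.List.pySetD (PySem.List.pyGetD t (p.1 - x_min) []) (p.2 - y_min) 1))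
    trans

-- ===== PORT B =====
-- min/max of an empty list raise in Python; the port totalises them with .getD 0
-- (Pre_ excludes the empty list).
def trans_puzzle_alt (puzzle_location : List (Int × Int)) : List (List Int) :=
  let xs := puzzle_location.map (·.1)
  let ys := puzzle_location.map (·.2)
  let x_min := (PySem.List.min? xs (fun v => v)).getD 0
  let y_min := (PySem.List.min? ys (fun v => v)).getD 0
  let height := (PySem.List.max? xs (fun v => v)).getD 0 - x_min + 1
  let width := (PySem.List.max? ys (fun v => v)).getD 0 - y_min + 1
  let rows : PySem.Dict Int (PySem.Set Int) :=
    puzzle_location.foldl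
      (fun d p => d.modify (p.1 - x_min) PySem.Set.empty (fun s => s.add (p.2 - y_min)))
      PySem.Dict.empty
  (PySem.List.pyRange 0 height 1).map (fun i =>
    match PySem.Dict.get? rows i with
    | some s => (PySem.List.pyRange 0 width 1).map (fun j =>
        if PySem.Set.contains s j then (1 : Int) else 0)
    | none => PySem.List.pyRepeat [(0 : Int)] width)

-- ===== PRECONDITION & SPEC =====
-- Pre_ excludes the empty list (B's min raises ValueError there, A returns []) and lists where,
-- on some axis, every coordinate exceeds 100 or every coordinate is below -1: there A's 100/-1
-- min/max seeds pad the grid accidentally, outside the function's natural 0..100 board domain.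
def Pre_trans_puzzle (puzzle_location : List (Int × Int)) : Prop :=
  puzzle_location ≠ [] ∧
  (∃ p ∈ puzzle_location, p.1 ≤ 100) ∧ (∃ p ∈ puzzle_location, -1 ≤ p.1) ∧
  (∃ p ∈ puzzle_location, p.2 ≤ 100) ∧ (∃ p ∈ puzzle_location, -1 ≤ p.2)
instance (puzzle_location : List (Int × Int)) : Decidable (Pre_trans_puzzle puzzle_location) := by
  unfold Pre_trans_puzzle; infer_instance

def pvWitness_trans_puzzle : (List (Int × Int)) := [(1, 2), (0, 0), (1, 1)]

def Spec_trans_puzzle (puzzle_location : List (Int × Int)) (out : List (List Int)) : Prop := out = trans_puzzle_alt puzzle_location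
instance (puzzle_location : List (Int × Int)) (out : List (List Int)) : Decidable (Spec_trans_puzzle puzzle_location out) := by unfold Spec_trans_puzzle; infer_instance

-- ===== CLAIM (what is proved, stated in full; the proofs are below) =====
def Claim_equal_trans_puzzle : Prop := ∀ (puzzle_location : List (Int × Int)), Dom_trans_puzzle puzzle_location → Pre_trans_puzzle puzzle_location → Spec_trans_puzzle puzzle_location (trans_puzzle puzzle_location)

-- ===== LEMMAS AND PROOFS =====

def pvWrite (xm ym : Int) (t : List (List Int)) (p : Int × Int) : List (List Int) :=
  PySem.List.pySetD t (p.1 - xm)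
    (PySem.List.pySetD (PySem.List.pyGetD t (p.1 - xm) []) (p.2 - ym) 1)

theorem pv_foldl_min_seed (l : List Int) (x c : Int) :
    (x :: l).foldl min c = min c (l.foldl min x) := by
  induction l generalizing x c with
  | nil => simp
  | cons y l ih =>
    have h1 : List.foldl min c (x :: y :: l) = List.foldl min (min c x) (y :: l) := rfl
    rw [h1, ih, ih, min_assoc]

theorem pv_foldl_max_seed (l : List Int) (x c : Int) :
    (x :: l).foldl max c = max c (l.foldl max x) := by
  induction l generalizing x c with
  | nil => simp
  | cons y l ih =>
    have h1 : List.foldl max c (x :: y :: l) = List.foldl max (max c x) (y :: l) := rfl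
    rw [h1, ih, ih, max_assoc]

theorem pv_min_getD (xs : List Int) (h : ∃ x ∈ xs, x ≤ 100) :
    (PySem.List.min? xs (fun v => v)).getD 0 = xs.foldl min 100 := by
  cases xs with
  | nil => rcases h with ⟨x, hx, _⟩; cases hx
  | cons a t =>
    rw [PySem.List.min?_id_cons, Option.getD_some, pv_foldl_min_seed]
    rcases h with ⟨x, hx, hle⟩
    have hmin : t.foldl min a ≤ 100 := by
      rcases List.mem_cons.1 hx with rfl | hxt
      · exact le_trans (PySem.List.foldl_min_le t x).1 hle
      · exact le_trans ((PySem.List.foldl_min_le t a).2 x hxt) hle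
    omega

theorem pv_max_getD (xs : List Int) (h : ∃ x ∈ xs, -1 ≤ x) :
    (PySem.List.max? xs (fun v => v)).getD 0 = xs.foldl max (-1) := by
  cases xs with
  | nil => rcases h with ⟨x, hx, _⟩; cases hx
  | cons a t =>
    rw [PySem.List.max?_id_cons, Option.getD_some, pv_foldl_max_seed]
    rcases h with ⟨x, hx, hle⟩
    have hmax : -1 ≤ t.foldl max a := by
      rcases List.mem_cons.1 hx with rfl | hxt
      · exact le_trans hle (PySem.List.le_foldl_max t x).1
      · exact le_trans hle ((PySem.List.le_foldl_max t a).2 x hxt)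
    omega

theorem pv_fold4 (ps : List (Int × Int)) (a b c d : Int) :
    ps.foldl (fun (s : Int × Int × Int × Int) p =>
      (min s.1 p.1, max s.2.1 p.1, min s.2.2.1 p.2, max s.2.2.2 p.2)) (a, b, c, d)
    = ((ps.map Prod.fst).foldl min a, (ps.map Prod.fst).foldl max b,
       (ps.map Prod.snd).foldl min c, (ps.map Prod.snd).foldl max d) := by
  induction ps generalizing a b c d with
  | nil => simp
  | cons p ps ih => simp [ih]

theorem pv_fill_length (xm ym : Int) (ps : List (Int × Int)) (t : List (List Int)) :
    (ps.foldl (pvWrite xm ym) t).length = t.length := by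
  induction ps generalizing t with
  | nil => rfl
  | cons p ps ih => rw [List.foldl_cons, ih, pvWrite, PySem.List.length_pySetD]

theorem pv_write_eq (xm ym : Int) (t : List (List Int)) (p : Int × Int)
    (hx0 : 0 ≤ p.1 - xm) (hx1 : (p.1 - xm).toNat < t.length)
    (hy0 : 0 ≤ p.2 - ym) :
    pvWrite xm ym t p
      = t.set (p.1 - xm).toNat
          ((t.getD (p.1 - xm).toNat []).set (p.2 - ym).toNat 1) := by
  rw [pvWrite, PySem.List.pySetD_of_nonneg _ _ hx0, PySem.List.pySetD_of_nonneg _ _ hy0,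
    PySem.List.pyGetD_eq_getElem _ _ hx0 (by omega), List.getD_eq_getElem]

theorem pv_fill_rows (xm ym : Int) (L : Nat) (ps : List (Int × Int)) (t : List (List Int))
    (hrow : ∀ row ∈ t, row.length = L)
    (hb : ∀ p ∈ ps, 0 ≤ p.1 - xm ∧ (p.1 - xm).toNat < t.length ∧ 0 ≤ p.2 - ym) :
    ∀ row ∈ ps.foldl (pvWrite xm ym) t, row.length = L := by
  induction ps generalizing t with
  | nil => simpa using hrow
  | cons p ps ih =>
    have hbp := hb p (by simp)
    rw [List.foldl_cons, pv_write_eq xm ym t p hbp.1 hbp.2.1 hbp.2.2]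
    apply ih
    · intro row hr
      rcases List.mem_or_eq_of_mem_set hr with h | h
      · exact hrow row h
      · rw [h, List.length_set, List.getD_eq_getElem _ _ hbp.2.1]
        exact hrow _ (List.getElem_mem _)
    · intro q hq
      have := hb q (by simp [hq])
      simpa using this

theorem pv_fill_getD (xm ym : Int) (L : Nat) (ps : List (Int × Int)) (t : List (List Int))
    (hrow : ∀ row ∈ t, row.length = L)
    (hb : ∀ p ∈ ps, 0 ≤ p.1 - xm ∧ (p.1 - xm).toNat < t.length ∧ 0 ≤ p.2 - ym ∧ (p.2 - ym).toNat < L)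
    (i j : Nat) :
    ((ps.foldl (pvWrite xm ym) t).getD i []).getD j 0
      = if (xm + (i : Int), ym + (j : Int)) ∈ ps then 1 else (t.getD i []).getD j 0 := by
  induction ps generalizing t with
  | nil => simp
  | cons p ps ih =>
    have hbp := hb p (by simp)
    rw [List.foldl_cons, pv_write_eq xm ym t p hbp.1 hbp.2.1 hbp.2.2.1]
    rw [ih]
    · set a := (p.1 - xm).toNat with ha
      set b := (p.2 - ym).toNat with hb'
      have hset : (((t.set a ((t.getD a []).set b 1)).getD i []).getD j 0)
          = if a = i ∧ b = j then 1 else (t.getD i []).getD j 0 := by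
        have hL : (t.getD a []).length = L := by
          rw [List.getD_eq_getElem _ _ hbp.2.1]; exact hrow _ (List.getElem_mem _)
        by_cases hai : a = i
        · subst hai
          have houter : (t.set a ((t.getD a []).set b 1)).getD a []
              = (t.getD a []).set b 1 := by
            rw [List.getD_eq_getElem _ _ (by simpa using hbp.2.1)]
            exact List.getElem_set_self _
          rw [houter]
          by_cases hbj : b = j
          · subst hbj
            rw [List.getD_eq_getElem _ _ (by rw [List.length_set]; omega)]
            simp
          · simp only [hbj, and_false, if_false]
            rcases Nat.lt_or_ge j L with hj | hj
            · rw [List.getD_eq_getElem _ _ (by rw [List.length_set]; omega),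
                  List.getD_eq_getElem _ _ (by omega : j < (t.getD a []).length),
                  List.getElem_set_ne (by omega)]
            · rw [List.getD_eq_default _ _ (by rw [List.length_set]; omega),
                  List.getD_eq_default _ _ (by omega)]
        · simp only [hai, false_and, if_false]
          have houter : (t.set a ((t.getD a []).set b 1)).getD i [] = t.getD i [] := by
            rcases Nat.lt_or_ge i t.length with hi | hi
            · rw [List.getD_eq_getElem _ _ (by simpa using hi), List.getD_eq_getElem _ _ hi,
                  List.getElem_set_ne (by omega)]
            · rw [List.getD_eq_default _ _ (by simpa using hi), List.getD_eq_default _ _ hi]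
          rw [houter]
      rw [hset]
      have hpeq : (p = (xm + (i : Int), ym + (j : Int))) ↔ (a = i ∧ b = j) := by
        constructor
        · intro h; rw [h] at ha hb'; omega
        · rintro ⟨h1, h2⟩
          have : p.1 = xm + (i : Int) := by omega
          have : p.2 = ym + (j : Int) := by omega
          exact Prod.ext (by omega) this
      by_cases hmem : (xm + (i : Int), ym + (j : Int)) ∈ ps
      · simp [hmem]
      · by_cases hp : a = i ∧ b = j
        · simp [hmem, hp, hpeq.2 hp]
        · have hne : p ≠ (xm + (i : Int), ym + (j : Int)) := fun h => hp (hpeq.1 h)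
          simp only [List.mem_cons, hmem, or_false, hp, if_false]
          rw [if_neg (fun h => hne h.symm)]
    · intro row hr
      rcases List.mem_or_eq_of_mem_set hr with h | h
      · exact hrow row h
      · rw [h, List.length_set, List.getD_eq_getElem _ _ hbp.2.1]
        exact hrow _ (List.getElem_mem _)
    · intro q hq
      have := hb q (by simp [hq])
      simpa using this

theorem pv_rows_mem (xm ym : Int) (ps : List (Int × Int))
    (d : PySem.Dict Int (PySem.Set Int)) (i j : Int) :
    j ∈ (ps.foldl (fun d p => d.modify (p.1 - xm) PySem.Set.empty (fun s => s.add (p.2 - ym))) d).getD i PySem.Set.empty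
      ↔ j ∈ d.getD i PySem.Set.empty ∨ ∃ p ∈ ps, p.1 - xm = i ∧ p.2 - ym = j := by
  induction ps generalizing d with
  | nil => simp
  | cons p ps ih =>
    rw [List.foldl_cons, ih, PySem.Dict.getD_modify]
    by_cases h : i = p.1 - xm
    · subst h
      rw [if_pos rfl, PySem.Set.mem_add]
      constructor
      · rintro ((hd | he) | ⟨q, hq, h1, h2⟩)
        · exact Or.inl hd
        · exact Or.inr ⟨p, by simp, rfl, he.symm⟩
        · exact Or.inr ⟨q, by simp [hq], h1, h2⟩
      · rintro (hd | ⟨q, hq, h1, h2⟩)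
        · exact Or.inl (Or.inl hd)
        · rcases List.mem_cons.1 hq with rfl | hq'
          · exact Or.inl (Or.inr h2.symm)
          · exact Or.inr ⟨q, hq', h1, h2⟩
    · rw [if_neg h]
      constructor
      · rintro (hd | ⟨q, hq, h1, h2⟩)
        · exact Or.inl hd
        · exact Or.inr ⟨q, by simp [hq], h1, h2⟩
      · rintro (hd | ⟨q, hq, h1, h2⟩)
        · exact Or.inl hd
        · rcases List.mem_cons.1 hq with rfl | hq'
          · exact absurd h1.symm h
          · exact Or.inr ⟨q, hq', h1, h2⟩

theorem pv_main (ps : List (Int × Int)) (hpre : Pre_trans_puzzle ps) :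
    trans_puzzle ps = trans_puzzle_alt ps := by
  obtain ⟨-, hx1, hx2, hy1, hy2⟩ := hpre
  unfold trans_puzzle trans_puzzle_alt
  rw [pv_fold4]
  have e1 := pv_min_getD (ps.map (·.1)) (by rcases hx1 with ⟨p, hp, h⟩; exact ⟨p.1, List.mem_map_of_mem hp, h⟩)
  have e2 := pv_min_getD (ps.map (·.2)) (by rcases hy1 with ⟨p, hp, h⟩; exact ⟨p.2, List.mem_map_of_mem hp, h⟩)
  have e3 := pv_max_getD (ps.map (·.1)) (by rcases hx2 with ⟨p, hp, h⟩; exact ⟨p.1, List.mem_map_of_mem hp, h⟩)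
  have e4 := pv_max_getD (ps.map (·.2)) (by rcases hy2 with ⟨p, hp, h⟩; exact ⟨p.2, List.mem_map_of_mem hp, h⟩)
  simp only [e1, e2, e3, e4, PySem.List.pyRepeat_singleton]
  set xs := ps.map Prod.fst with hxs
  set ys := ps.map Prod.snd with hys
  set xm := xs.foldl min 100 with hxm
  set xM := xs.foldl max (-1) with hxM
  set ym := ys.foldl min 100 with hym
  set yM := ys.foldl max (-1) with hyM
  set L := (yM - ym + 1).toNat with hL
  set R := ps.foldl
      (fun d p => d.modify (p.1 - xm) PySem.Set.empty (fun s => s.add (p.2 - ym)))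
      PySem.Dict.empty with hR
  have hRmem : ∀ i j : Int,
      j ∈ R.getD i PySem.Set.empty ↔ ∃ p ∈ ps, p.1 - xm = i ∧ p.2 - ym = j := by
    intro i j
    rw [hR, pv_rows_mem]
    simp [PySem.Dict.getD_empty, PySem.Set.empty]
  set t0 := (PySem.List.pyRange 0 (xM - xm + 1) 1).map
      (fun _ => List.replicate (yM - ym + 1).toNat (0 : Int)) with ht0
  have ht0len : t0.length = (xM - xm + 1).toNat := by
    simp [ht0, PySem.List.length_pyRange_one]
  have ht0rows : ∀ row ∈ t0, row.length = L := by
    intro row hr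
    rcases List.mem_map.1 hr with ⟨_, _, h⟩
    simp [← h, hL]
  have hbnd : ∀ p ∈ ps, xm ≤ p.1 ∧ p.1 ≤ xM ∧ ym ≤ p.2 ∧ p.2 ≤ yM := by
    intro p hp
    exact ⟨(PySem.List.foldl_min_le xs 100).2 p.1 (List.mem_map_of_mem hp),
      (PySem.List.le_foldl_max xs (-1)).2 p.1 (List.mem_map_of_mem hp),
      (PySem.List.foldl_min_le ys 100).2 p.2 (List.mem_map_of_mem hp),
      (PySem.List.le_foldl_max ys (-1)).2 p.2 (List.mem_map_of_mem hp)⟩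
  have hb : ∀ p ∈ ps, 0 ≤ p.1 - xm ∧ (p.1 - xm).toNat < t0.length ∧ 0 ≤ p.2 - ym ∧
      (p.2 - ym).toNat < L := by
    intro p hp
    have := hbnd p hp
    refine ⟨by omega, ?_, by omega, by omega⟩
    rw [ht0len]; omega
  have hwrite : (fun (t : List (List Int)) (p : Int × Int) =>
      PySem.List.pySetD t (p.1 - xm)
        (PySem.List.pySetD (PySem.List.pyGetD t (p.1 - xm) []) (p.2 - ym) 1)) = pvWrite xm ym := by
    funext t p; rfl
  rw [hwrite]
  have hrowf : ∀ i : Int, (match R.get? i with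
      | some s => (PySem.List.pyRange 0 (yM - ym + 1) 1).map (fun j =>
          if PySem.Set.contains s j then (1 : Int) else 0)
      | none => List.replicate (yM - ym + 1).toNat (0 : Int)).length = L := by
    intro i
    cases hg : R.get? i with
    | some s => simp [PySem.List.length_pyRange_one, hL]
    | none => simp [hL]
  apply List.ext_getElem
  · rw [pv_fill_length, ht0len]
    simp [PySem.List.length_pyRange_one]
  · intro i hi1 hi2
    have hiLen : i < (xM - xm + 1).toNat := by
      simpa [pv_fill_length, ht0len] using hi1
    have hlen1 : (List.foldl (pvWrite xm ym) t0 ps)[i].length = L := by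
      apply pv_fill_rows xm ym L ps t0 ht0rows (fun p hp => ⟨(hb p hp).1, (hb p hp).2.1, (hb p hp).2.2.1⟩)
      exact List.getElem_mem _
    have hcell : ∀ (j : Nat) (hj1 : j < (List.foldl (pvWrite xm ym) t0 ps)[i].length),
        (List.foldl (pvWrite xm ym) t0 ps)[i][j]
          = if (xm + (i : Int), ym + (j : Int)) ∈ ps then 1 else 0 := by
      intro j hj1
      have := pv_fill_getD xm ym L ps t0 ht0rows hb i j
      rw [List.getD_eq_getElem _ _ hi1, List.getD_eq_getElem _ _ hj1] at this
      rw [this]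
      have hipr : i < (PySem.List.pyRange 0 (xM - xm + 1) 1).length := by
        rw [PySem.List.length_pyRange_one]; omega
      have ht0i : t0.getD i [] = List.replicate (yM - ym + 1).toNat (0 : Int) := by
        rw [List.getD_eq_getElem?_getD, ht0, List.getElem?_map,
          List.getElem?_eq_getElem hipr]
        rfl
      rw [ht0i]
      simp [List.getD_eq_getElem?_getD, List.getElem?_replicate]
      split_ifs <;> rfl
    simp only [List.getElem_map, PySem.List.getElem_pyRange_one]
    cases hg : R.get? ((0 : Int) + i) with
    | some s =>
      have hgd : R.getD ((0 : Int) + i) PySem.Set.empty = s := by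
        rw [PySem.Dict.getD_eq_get?_getD, hg, Option.getD_some]
      have hmemiff : ∀ j : Nat,
          (PySem.Set.contains s ((0 : Int) + j) = true ↔ (xm + (i : Int), ym + (j : Int)) ∈ ps) := by
        intro j
        rw [PySem.Set.contains_iff, ← hgd, hRmem]
        constructor
        · rintro ⟨p, hp, h1, h2⟩
          have : p = (xm + (i : Int), ym + (j : Int)) := Prod.ext (by omega) (by omega)
          rwa [← this]
        · intro hp
          exact ⟨_, hp, by simp, by simp⟩
      apply List.ext_getElem
      · rw [hlen1]
        simp [PySem.List.length_pyRange_one, hL]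
      · intro j hj1 hj2
        rw [hcell j hj1]
        simp only [List.getElem_map, PySem.List.getElem_pyRange_one]
        by_cases hc : (xm + (i : Int), ym + (j : Int)) ∈ ps
        · rw [if_pos hc, if_pos ((hmemiff j).2 hc)]
        · rw [if_neg hc, if_neg (fun h => hc ((hmemiff j).1 h))]
    | none =>
      apply List.ext_getElem
      · rw [hlen1]
        simp [hL]
      · intro j hj1 hj2
        rw [hcell j hj1]
        simp only [List.getElem_replicate]
        rw [if_neg]
        intro hc
        have hmem : ((0 : Int) + j) ∈ R.getD ((0 : Int) + i) PySem.Set.empty := by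
          rw [hRmem]
          exact ⟨_, hc, by simp, by simp⟩
        rw [PySem.Dict.getD_eq_get?_getD, hg, Option.getD_none] at hmem
        simp [PySem.Set.empty] at hmem

-- ===== VERDICT (by name: the statement is the Claim_ definition above) =====
theorem trans_puzzle_spec : Claim_equal_trans_puzzle := by
  intro ps _ hpre
  unfold Spec_trans_puzzle
  exact pv_main ps hpre
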